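-- pv_equiv track=rewrite | github.com/pypi-data/pypi-mirror-47 | packages/azureml-train-automl/azureml_train_automl-1.0.41-py3-none-any.whl/azureml/train/automl/_remote_script.py | _get_parent_run_id
-- ===== SOURCE A (Python) =====
-- def _get_parent_run_id(run_id: str) -> str:
--     split = run_id.split('_')
--     if len(split) > 2:
--         split.pop()
--     else:
--         return run_id
--     parent_run_id = '_'.join(str(e) for e in split)
--     return parent_run_id
-- ===== SOURCE B (Python) =====
-- def _get_parent_run_id(run_id: str) -> str:
--     kept = []      # characters of the parent id confirmed so far
--     pending = []   # the current (possibly last) segment, with its leading '_'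
--     seen = 0       # underscores seen
--     for ch in run_id:
--         if ch == '_':
--             seen += 1
--             kept.extend(pending)
--             pending = ['_']
--         else:
--             pending.append(ch)
--     if seen >= 2:
--         return ''.join(kept)
--     return run_id
-- ===== Notes on version B (the rewrite author's own statement) =====
-- stated objective: alternative
-- what changed: B is a one-pass state machine over the characters: it maintains a confirmed prefix, a pending buffer flushed at each underscore, and an underscore counter, instead of A's split-into-list / pop / re-join pipeline; the last segment is simply the buffer left pending at the end.
import Mathlib
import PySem

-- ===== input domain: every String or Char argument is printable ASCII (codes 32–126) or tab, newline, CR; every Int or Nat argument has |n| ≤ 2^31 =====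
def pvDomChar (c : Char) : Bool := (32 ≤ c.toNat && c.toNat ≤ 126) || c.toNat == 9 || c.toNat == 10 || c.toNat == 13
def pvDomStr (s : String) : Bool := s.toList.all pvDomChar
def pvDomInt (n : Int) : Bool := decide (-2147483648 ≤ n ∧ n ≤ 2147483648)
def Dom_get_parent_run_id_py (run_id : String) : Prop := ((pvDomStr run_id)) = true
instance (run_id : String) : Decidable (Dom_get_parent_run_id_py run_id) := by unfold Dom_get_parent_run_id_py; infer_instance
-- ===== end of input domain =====

-- B replaces A's split/pop/join pipeline by a single forward state machine over the characters (alternative decomposition; same O(n) cost).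

-- ===== PORT A =====
-- split = run_id.split('_'); if len(split) > 2: split.pop() else: return run_id; return '_'.join(split)
def get_parent_run_id_py (run_id : String) : String :=
  let split := PySem.Chars.splitOn run_id.toList ['_']
  if split.length > 2 then
    match PySem.List.pop? split with
    | some (_, split') => String.ofList (PySem.Chars.join ['_'] split')
    | none => run_id   -- unreachable: split is nonempty when its length exceeds 2
  else run_id

-- ===== PORT B =====
-- one pass: kept = confirmed prefix, pending = current segment with its leading '_', seen = underscore count;
-- on '_' flush pending into kept; at the end drop pending iff seen >= 2
def get_parent_run_id_py_alt (run_id : String) : String :=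
  let st := run_id.toList.foldl
    (fun (st : List Char × List Char × Nat) ch =>
      if ch = '_' then (st.1 ++ st.2.1, ['_'], st.2.2 + 1)
      else (st.1, st.2.1 ++ [ch], st.2.2))
    ([], [], 0)
  if 2 ≤ st.2.2 then String.ofList st.1 else run_id

-- ===== PRECONDITION & SPEC =====
def Spec_get_parent_run_id_py (run_id : String) (out : String) : Prop := out = get_parent_run_id_py_alt run_id
instance (run_id : String) (out : String) : Decidable (Spec_get_parent_run_id_py run_id out) := by unfold Spec_get_parent_run_id_py; infer_instance

-- ===== CLAIM (what is proved, stated in full; the proofs are below) =====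
def Claim_equal_get_parent_run_id_py : Prop := ∀ (run_id : String), Dom_get_parent_run_id_py run_id → Spec_get_parent_run_id_py run_id (get_parent_run_id_py run_id)

-- ===== LEMMAS AND PROOFS =====

-- the step function of B's fold, named for the proofs
def bStep (st : List Char × List Char × Nat) (ch : Char) : List Char × List Char × Nat :=
  if ch = '_' then (st.1 ++ st.2.1, ['_'], st.2.2 + 1)
  else (st.1, st.2.1 ++ [ch], st.2.2)

-- reference single-char split on '_' (proof-side only)
def sp : List Char → List (List Char)
  | [] => [[]]
  | c :: t =>
    if c = '_' then [] :: sp t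
    else
      match sp t with
      | [] => [[c]]
      | h :: r => (c :: h) :: r

theorem sp_ne_nil (l : List Char) : sp l ≠ [] := by
  cases l with
  | nil => simp [sp]
  | cons c t =>
    simp only [sp]
    split
    · simp
    · split
      · simp
      · simp

-- splitOn.go characterised by sp
theorem splitOn_go_eq (fuel : Nat) (l cur : List Char) (acc : List (List Char))
    (hf : l.length ≤ fuel) :
    PySem.Chars.splitOn.go ['_'] fuel l cur acc =
      acc.reverse ++ (match sp l with
                      | [] => [cur.reverse]
                      | h :: r => (cur.reverse ++ h) :: r) := by
  induction fuel generalizing l cur acc with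
  | zero =>
    interval_cases hl : l.length
    · rw [List.length_eq_zero_iff] at hl
      subst hl
      simp [PySem.Chars.splitOn.go, sp]
  | succ fuel ih =>
    cases l with
    | nil => simp [PySem.Chars.splitOn.go, sp]
    | cons c rest =>
      by_cases hc : c = '_'
      · subst hc
        have hpre : (['_'].isPrefixOf ('_' :: rest)) = true := by
          simp [List.isPrefixOf]
        simp only [PySem.Chars.splitOn.go, hpre, if_true]
        simp only [List.length_cons, List.length_nil, List.drop_succ_cons, List.drop_zero]
        rw [ih rest [] (List.reverse cur :: acc) (by simpa using Nat.le_of_succ_le_succ (by simpa using hf))]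
        simp only [sp, if_true]
        cases hsp : sp rest with
        | nil => exact absurd hsp (sp_ne_nil rest)
        | cons h r => simp
      · have hpre : (['_'].isPrefixOf (c :: rest)) = false := by
          simp [List.isPrefixOf, Ne.symm hc]
        simp only [PySem.Chars.splitOn.go, hpre]
        rw [if_neg (by simp)]
        rw [ih rest (c :: cur) acc (by simpa using Nat.le_of_succ_le_succ (by simpa using hf))]
        simp only [sp, if_neg hc]
        cases hsp : sp rest with
        | nil => exact absurd hsp (sp_ne_nil rest)
        | cons h r => simp

theorem splitOn_eq (l : List Char) : PySem.Chars.splitOn l ['_'] = sp l := by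
  unfold PySem.Chars.splitOn
  rw [splitOn_go_eq (l.length + 1) l [] [] (by omega)]
  cases hsp : sp l with
  | nil => exact absurd hsp (sp_ne_nil l)
  | cons h r => simp

theorem sp_length (l : List Char) : (sp l).length = l.count '_' + 1 := by
  induction l with
  | nil => simp [sp]
  | cons c t ih =>
    by_cases hc : c = '_'
    · subst hc; simp [sp, ih]
    · simp only [sp, if_neg hc]
      cases hsp : sp t with
      | nil => exact absurd hsp (sp_ne_nil t)
      | cons h r =>
        rw [hsp] at ih
        simp [hc, ← ih]

theorem inter_cons2 (x y : List Char) (zs : List (List Char)) :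
    ['_'].intercalate (x :: y :: zs) = x ++ ['_'] ++ ['_'].intercalate (y :: zs) := by
  simp [List.intercalate]

theorem inter_single (x : List Char) : ['_'].intercalate [x] = x := by
  simp [List.intercalate]

theorem intercalate_sp (l : List Char) : ['_'].intercalate (sp l) = l := by
  induction l with
  | nil => simp [sp, List.intercalate]
  | cons c t ih =>
    cases hsp : sp t with
    | nil => exact absurd hsp (sp_ne_nil t)
    | cons h r =>
      rw [hsp] at ih
      by_cases hc : c = '_'
      · subst hc
        simp only [sp, if_true, hsp]
        rw [inter_cons2]
        simpa using ih
      · simp only [sp, if_neg hc, hsp]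
        cases r with
        | nil =>
          rw [inter_single] at ih
          rw [inter_single]
          simp [ih]
        | cons h2 r2 =>
          rw [inter_cons2] at ih
          rw [inter_cons2]
          simp [ih]

theorem sp_of_no_underscore (v : List Char) (hv : '_' ∉ v) : sp v = [v] := by
  induction v with
  | nil => simp [sp]
  | cons c t ih =>
    simp only [List.mem_cons, not_or] at hv
    simp only [sp, if_neg (Ne.symm hv.1), ih hv.2]

theorem sp_append (u w : List Char) : sp (u ++ '_' :: w) = sp u ++ sp w := by
  induction u with
  | nil => simp [sp]
  | cons c t ih =>
    by_cases hc : c = '_'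
    · subst hc
      simp [sp, ih]
    · simp only [List.cons_append, sp, if_neg hc, ih]
      cases hsp : sp t with
      | nil => exact absurd hsp (sp_ne_nil t)
      | cons h r => simp

theorem last_split (l : List Char) (h : '_' ∈ l) :
    ∃ u v, l = u ++ '_' :: v ∧ '_' ∉ v := by
  induction l with
  | nil => simp at h
  | cons c t ih =>
    by_cases ht : '_' ∈ t
    · obtain ⟨u, v, rfl, hv⟩ := ih ht
      exact ⟨c :: u, v, rfl, hv⟩
    · have hc : c = '_' := by
        rcases List.mem_cons.mp h with h' | h'
        · exact h'.symm
        · exact absurd h' ht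
      exact ⟨[], t, by simp [hc], ht⟩

-- B's fold counts underscores in its third component
theorem bFold_seen (l : List Char) (k p : List Char) (s : Nat) :
    (l.foldl bStep (k, p, s)).2.2 = s + l.count '_' := by
  induction l generalizing k p s with
  | nil => simp
  | cons c t ih =>
    by_cases hc : c = '_'
    · subst hc
      simp [bStep, ih]
      omega
    · simp [bStep, hc, ih]

-- kept ++ pending is an invariant of B's fold
theorem bFold_keep (l : List Char) (k p : List Char) (s : Nat) :
    (l.foldl bStep (k, p, s)).1 ++ (l.foldl bStep (k, p, s)).2.1 = k ++ p ++ l := by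
  induction l generalizing k p s with
  | nil => simp
  | cons c t ih =>
    by_cases hc : c = '_'
    · subst hc
      simp only [List.foldl_cons, bStep]
      rw [ih]
      simp
    · simp only [List.foldl_cons, bStep, if_neg hc]
      rw [ih]
      simp

-- a fold over an underscore-free suffix never touches kept
theorem bFold_no_underscore (l : List Char) (hv : '_' ∉ l) (k p : List Char) (s : Nat) :
    l.foldl bStep (k, p, s) = (k, p ++ l, s) := by
  induction l generalizing p with
  | nil => simp
  | cons c t ih =>
    simp only [List.mem_cons, not_or] at hv
    simp only [List.foldl_cons, bStep, if_neg (Ne.symm hv.1)]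
    rw [ih hv.2]
    simp

-- on a string ending in '_'::v with '_'∉v, the final kept is exactly the prefix u
theorem bFold_last (u v : List Char) (hv : '_' ∉ v) :
    (u ++ '_' :: v).foldl bStep ([], [], 0) =
      (u, '_' :: v, u.count '_' + 1) := by
  rw [List.foldl_append, List.foldl_cons]
  have hstep : bStep (u.foldl bStep ([], [], 0)) '_' =
      ((u.foldl bStep ([], [], 0)).1 ++ (u.foldl bStep ([], [], 0)).2.1, ['_'],
       (u.foldl bStep ([], [], 0)).2.2 + 1) := by
    simp [bStep]
  rw [hstep, bFold_no_underscore v hv]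
  have hkeep := bFold_keep u [] [] 0
  have hseen := bFold_seen u [] [] 0
  simp only [List.nil_append] at hkeep hseen
  rw [hkeep, hseen]
  simp

-- ===== VERDICT (by name: the statement is the Claim_ definition above) =====
theorem get_parent_run_id_py_spec : Claim_equal_get_parent_run_id_py := by
  intro run_id _
  unfold Spec_get_parent_run_id_py get_parent_run_id_py get_parent_run_id_py_alt
  have hfoldB : run_id.toList.foldl
      (fun (st : List Char × List Char × Nat) ch =>
        if ch = '_' then (st.1 ++ st.2.1, ['_'], st.2.2 + 1)
        else (st.1, st.2.1 ++ [ch], st.2.2)) ([], [], 0)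
      = run_id.toList.foldl bStep ([], [], 0) := rfl
  rw [hfoldB]
  have hlen : (PySem.Chars.splitOn run_id.toList ['_']).length
      = run_id.toList.count '_' + 1 := by
    rw [splitOn_eq, sp_length]
  by_cases hge : 2 ≤ run_id.toList.count '_'
  · rw [if_pos (show (PySem.Chars.splitOn run_id.toList ['_']).length > 2 by
      rw [hlen]; omega)]
    have hmem : '_' ∈ run_id.toList := List.count_pos_iff.mp (by omega)
    obtain ⟨u, v, hl, hv⟩ := last_split run_id.toList hmem
    -- A side: split = sp u ++ [v], pop removes v, join restores u
    have hsplit : PySem.Chars.splitOn run_id.toList ['_'] = sp u ++ [v] := by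
      rw [splitOn_eq, hl, sp_append, sp_of_no_underscore v hv]
    rw [hsplit, PySem.List.pop?_last]
    -- B side: the fold ends with kept = u and seen = total count
    have hcnt : run_id.toList.count '_' = u.count '_' + 1 := by
      rw [hl]; simp [List.count_eq_zero.mpr hv]
    rw [hl, bFold_last u v hv]
    rw [if_pos (by simp only []; omega)]
    unfold PySem.Chars.join
    show String.ofList (['_'].intercalate (sp u)) = String.ofList u
    rw [intercalate_sp]
  · rw [if_neg (show ¬ (PySem.Chars.splitOn run_id.toList ['_']).length > 2 by
      rw [hlen]; omega)]
    have hseen := bFold_seen run_id.toList [] [] 0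
    rw [if_neg (by rw [hseen]; omega)]
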